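-- pv_equiv track=rewrite | github.com/iptch/advent-of-code-ipt | 2025/WGA/02/aoc_template.py | get_invalid_ids
-- ===== SOURCE A (Python) =====
-- def get_invalid_ids(ids, puzzle_part):
--     invalid_ids = []
--
--     for id in ids:
--         min_len = 1
--
--         if puzzle_part == 1:
--             quotient, remainder = divmod(len(id), 2)
--
--             if remainder == 0:
--                 min_len = quotient
--             else:
--                 continue
--
--         for i in range(min_len, len(id) // 2 + 1):
--             if id[:i] * (len(id) // i) == id:
--                 invalid_ids.append(int(id))
--                 break
--
--     return invalid_ids
-- ===== SOURCE B (Python) =====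
-- def get_invalid_ids(ids, puzzle_part):
--     invalid_ids = []
--     for id in ids:
--         n = len(id)
--         if puzzle_part == 1:
--             is_repeat = n > 0 and n % 2 == 0 and id[:n // 2] == id[n // 2:]
--         else:
--             is_repeat = n > 0 and id in (id + id)[1:-1]
--         if is_repeat:
--             invalid_ids.append(int(id))
--     return invalid_ids
-- ===== Notes on version B (the rewrite author's own statement) =====
-- stated objective: faster
-- what changed: B replaces A's trial of every candidate period i (building the tiled string id[:i]*(len//i) and comparing it for each i up to len/2) with the classic doubling trick: an id is a repeated string iff it occurs as a substring of (id+id)[1:-1] (and for part 1 a single comparison of the two halves), one linear substring search per id instead of a quadratic scan.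
import Mathlib
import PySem

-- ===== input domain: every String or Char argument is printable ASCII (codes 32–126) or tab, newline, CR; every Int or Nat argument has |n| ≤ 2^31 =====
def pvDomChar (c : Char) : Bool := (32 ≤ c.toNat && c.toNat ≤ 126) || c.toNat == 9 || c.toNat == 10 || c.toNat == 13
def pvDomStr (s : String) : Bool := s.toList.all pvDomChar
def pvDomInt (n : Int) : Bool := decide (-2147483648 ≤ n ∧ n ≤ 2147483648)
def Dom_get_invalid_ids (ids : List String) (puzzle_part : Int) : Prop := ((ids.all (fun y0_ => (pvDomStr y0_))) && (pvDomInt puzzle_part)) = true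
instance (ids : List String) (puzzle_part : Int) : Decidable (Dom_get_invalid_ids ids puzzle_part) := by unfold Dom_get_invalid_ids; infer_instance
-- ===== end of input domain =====

-- B replaces A's per-id trial of every candidate period (building id[:i]*(len//i) for each i)
-- with one substring test: an id is a repeated string iff it occurs inside (id+id)[1:-1]
-- (for part 1, a single comparison of the two halves); objective: faster.

-- ===== PORT A =====
-- id[:i] * (len(id) // i) == id
def pvTileA (cs : List Char) (i : Int) : Bool :=
  PySem.List.pyRepeat (PySem.List.slice cs none (some i)) (PySem.Int.floordiv (cs.length : Int) i) == cs

-- the inner 'for i in range(...)' with its break-on-first-success and append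
def pvInnerA (cs : List Char) (v : Int) (acc : List Int) : List Int → List Int
  | [] => acc
  | i :: rest => if pvTileA cs i then acc ++ [v] else pvInnerA cs v acc rest

-- one iteration of A's outer loop (body for a single id)
def pvStepA (puzzle_part : Int) (acc : List Int) (id : String) : List Int :=
  let cs := id.toList
  let n : Int := (cs.length : Int)
  if puzzle_part == 1 then
    let q := PySem.Int.floordiv n 2
    let r := PySem.Int.mod n 2
    if r == 0 then
      pvInnerA cs ((PySem.Int.ofStr? id).getD 0) acc (PySem.List.pyRange q (PySem.Int.floordiv n 2 + 1))
    else acc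
  else
    pvInnerA cs ((PySem.Int.ofStr? id).getD 0) acc (PySem.List.pyRange 1 (PySem.Int.floordiv n 2 + 1))

def get_invalid_ids (ids : List String) (puzzle_part : Int) : List Int :=
  ids.foldl (pvStepA puzzle_part) []

-- ===== PORT B =====
-- B's repeated-string test for one id
def pvRepB (cs : List Char) (puzzle_part : Int) : Bool :=
  let n : Int := (cs.length : Int)
  if puzzle_part == 1 then
    decide (0 < n) && (PySem.Int.mod n 2 == 0) &&
      (PySem.List.slice cs none (some (PySem.Int.floordiv n 2)) ==
       PySem.List.slice cs (some (PySem.Int.floordiv n 2)))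
  else
    decide (0 < n) && PySem.Chars.isIn cs (PySem.List.slice (cs ++ cs) (some 1) (some (-1)))

def get_invalid_ids_alt (ids : List String) (puzzle_part : Int) : List Int :=
  ids.foldl (fun acc id =>
    if pvRepB id.toList puzzle_part then acc ++ [(PySem.Int.ofStr? id).getD 0] else acc) []

-- ===== PRECONDITION & SPEC =====
-- 'id is a repeated string' (the ids on which A calls int(id)), as a closed-form shape test
def pvRepeats (cs : List Char) (puzzle_part : Int) : Bool :=
  if puzzle_part = 1 then
    decide (cs ≠ []) && decide (cs.length % 2 = 0) &&
      decide (cs.take (cs.length / 2) = cs.drop (cs.length / 2))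
  else
    decide (cs ≠ []) && PySem.Chars.isIn cs (((cs ++ cs).drop 1).dropLast)

-- Pre_ excludes exactly the inputs on which Python A raises: an empty id with puzzle_part == 1
-- (ZeroDivisionError in len(id) // i at i == 0) and a repeated-string id that int() cannot
-- parse (ValueError); A returns on every other input.
def Pre_get_invalid_ids (ids : List String) (puzzle_part : Int) : Prop :=
  (puzzle_part = 1 → "" ∉ ids) ∧
  ∀ s ∈ ids, pvRepeats s.toList puzzle_part = true → (PySem.Int.ofStr? s).isSome
instance (ids : List String) (puzzle_part : Int) : Decidable (Pre_get_invalid_ids ids puzzle_part) := by unfold Pre_get_invalid_ids; infer_instance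

def pvWitness_get_invalid_ids : List String × Int := (["1212", "7", "abc"], 2)

def Spec_get_invalid_ids (ids : List String) (puzzle_part : Int) (out : List Int) : Prop := out = get_invalid_ids_alt ids puzzle_part
instance (ids : List String) (puzzle_part : Int) (out : List Int) : Decidable (Spec_get_invalid_ids ids puzzle_part out) := by unfold Spec_get_invalid_ids; infer_instance

-- ===== CLAIM (what is proved, stated in full; the proofs are below) =====
def Claim_equal_get_invalid_ids : Prop := ∀ (ids : List String) (puzzle_part : Int), Dom_get_invalid_ids ids puzzle_part → Pre_get_invalid_ids ids puzzle_part → Spec_get_invalid_ids ids puzzle_part (get_invalid_ids ids puzzle_part)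

-- ===== LEMMAS AND PROOFS =====

-- A's inner loop appends v once iff some candidate length passes the tile test
theorem pvInnerA_eq (cs : List Char) (v : Int) (acc : List Int) (l : List Int) :
    pvInnerA cs v acc l = if l.any (pvTileA cs) then acc ++ [v] else acc := by
  induction l with
  | nil => simp [pvInnerA]
  | cons i rest ih =>
      by_cases h : pvTileA cs i = true <;> simp [pvInnerA, h, ih]

-- (s+s)[1:-1]
theorem pvSlice_mid (cs : List Char) :
    PySem.List.slice (cs ++ cs) (some 1) (some (-1)) = ((cs ++ cs).drop 1).dropLast := by
  simp [PySem.List.slice, List.dropLast_eq_take]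
  rcases cs with _ | ⟨c, t⟩
  · simp
  · simp
    congr 1
    omega

-- rotating by a multiple of a fixed rotation still fixes the list
theorem pvRotate_mul (s : List Char) (j : Nat) (h : s.rotate j = s) (m : Nat) :
    s.rotate (m * j) = s := by
  induction m with
  | zero => simp
  | succ k ih =>
      have : s.rotate (k * j + j) = s := by
        rw [← List.rotate_rotate, ih, h]
      simpa [Nat.succ_mul] using this

-- a rotation fixpoint is also fixed by the gcd of the shift and the length (Bezout)
theorem pvRotate_gcd (s : List Char) (j : Nat) (hj : 1 ≤ j) (hjn : j < s.length)
    (h : s.rotate j = s) : s.rotate (Nat.gcd j s.length) = s := by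
  have hn : 0 < s.length := by omega
  have hnz : (s.length : ℤ) ≠ 0 := by exact_mod_cast Nat.pos_iff_ne_zero.mp hn
  have hg_lt : Nat.gcd j s.length < s.length :=
    lt_of_le_of_lt (Nat.gcd_le_left s.length (by omega)) hjn
  have hbez : (Nat.gcd j s.length : ℤ) = j * Nat.gcdA j s.length + s.length * Nat.gcdB j s.length :=
    Nat.gcd_eq_gcd_ab j s.length
  have hm_nonneg : 0 ≤ Nat.gcdA j s.length % (s.length : ℤ) := Int.emod_nonneg _ hnz
  have hmdef : ((Nat.gcdA j s.length % (s.length : ℤ)).toNat : ℤ) = Nat.gcdA j s.length % (s.length : ℤ) :=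
    Int.toNat_of_nonneg hm_nonneg
  have key : ((((Nat.gcdA j s.length % (s.length : ℤ)).toNat * j) % s.length : ℕ) : ℤ)
      = ((Nat.gcd j s.length % s.length : ℕ) : ℤ) := by
    push_cast
    rw [hmdef]
    calc (Nat.gcdA j s.length % (s.length : ℤ)) * (j : ℤ) % (s.length : ℤ)
        = (Nat.gcdA j s.length * j) % s.length := by
          rw [Int.mul_emod, Int.emod_emod_of_dvd _ dvd_rfl, ← Int.mul_emod]
      _ = ((Nat.gcd j s.length : ℤ) - s.length * Nat.gcdB j s.length) % s.length := by
          congr 1; rw [hbez]; ring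
      _ = (Nat.gcd j s.length : ℤ) % s.length := by
          rw [Int.sub_emod, Int.mul_emod_right, Int.sub_zero, Int.emod_emod_of_dvd _ dvd_rfl]
  have keyN : ((Nat.gcdA j s.length % (s.length : ℤ)).toNat * j) % s.length
      = Nat.gcd j s.length % s.length := by exact_mod_cast key
  have hfix : s.rotate (Nat.gcd j s.length % s.length) = s := by
    rw [← keyN, List.rotate_mod]
    exact pvRotate_mul s j h _
  rwa [Nat.mod_eq_of_lt hg_lt] at hfix

-- an overlap-periodic list whose period divides the length is a tiling by its prefix
theorem pvTile_of_overlap (d : Nat) :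
    ∀ (k : Nat) (s : List Char), s.length = d * k → s.drop d = s.take (s.length - d) →
      s = (List.replicate k (s.take d)).flatten := by
  intro k
  induction k with
  | zero => intro s hlen _; simp at hlen; simp [hlen]
  | succ k ih =>
      intro s hlen hov
      have hlen' : s.length = d * k + d := by rw [hlen, Nat.mul_succ]
      rcases Nat.eq_zero_or_pos k with hk0 | hkpos
      · subst hk0
        simp [List.take_of_length_le (by omega : s.length ≤ d)]
      · have hdk : d ≤ d * k := Nat.le_mul_of_pos_right d hkpos
        have htlen : (s.drop d).length = d * k := by simp; omega
        have htov : (s.drop d).drop d = (s.drop d).take ((s.drop d).length - d) := by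
          rw [List.length_drop]
          conv_lhs => rw [hov]
          rw [List.drop_take]
        have htake : (s.drop d).take d = s.take d := by
          conv_lhs => rw [hov]
          rw [List.take_take]
          congr 1
          omega
        have hrec := ih (s.drop d) htlen htov
        calc s = s.take d ++ s.drop d := (List.take_append_drop d s).symm
        _ = s.take d ++ (List.replicate k ((s.drop d).take d)).flatten := by rw [← hrec]
        _ = (List.replicate (k+1) (s.take d)).flatten := by
              rw [htake, List.replicate_succ, List.flatten_cons]

-- a rotation fixpoint whose shift divides the length is a tiling by its prefix
theorem pvTile_of_rotate (s : List Char) (d : Nat) (hd : 1 ≤ d) (hdvd : d ∣ s.length)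
    (hrot : s.rotate d = s) : s = (List.replicate (s.length / d) (s.take d)).flatten := by
  obtain ⟨k, hk⟩ := hdvd
  have hdiv : s.length / d = k := by rw [hk]; exact Nat.mul_div_cancel_left k (by omega)
  rcases Nat.eq_zero_or_pos k with hk0 | hkpos
  · have hnil : s = [] := by
      have h0 := hk; rw [hk0, Nat.mul_zero] at h0
      exact List.eq_nil_of_length_eq_zero h0
    simp [hnil]
  · have hdle : d ≤ s.length := by rw [hk]; exact Nat.le_mul_of_pos_right d hkpos
    have hrot' : s.drop d ++ s.take d = s := by
      rw [← List.rotate_eq_drop_append_take hdle]; exact hrot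
    have hsplit : s.take (s.length - d) ++ s.drop (s.length - d) = s := List.take_append_drop _ s
    have hlen : (s.drop d).length = (s.take (s.length - d)).length := by simp
    have hov : s.drop d = s.take (s.length - d) :=
      (List.append_inj (hrot'.trans hsplit.symm) hlen).1
    rw [hdiv]
    exact pvTile_of_overlap d k s (by omega) hov

-- a tiling with at least two blocks is a rotation fixpoint
theorem pvRotate_of_tile (s : List Char) (i : Nat) (hi : 1 ≤ i) (hin : i ≤ s.length / 2)
    (ht : (List.replicate (s.length / i) (s.take i)).flatten = s) : s.rotate i = s := by
  have hile : i ≤ s.length := by omega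
  have hctake : (s.take i).length = i := by simp [hile]
  have hk2 : 2 ≤ s.length / i := by
    rw [Nat.le_div_iff_mul_le (by omega)]; omega
  obtain ⟨m, hm⟩ : ∃ m, s.length / i = m + 1 := ⟨s.length / i - 1, by omega⟩
  have hs' : s = s.take i ++ (List.replicate m (s.take i)).flatten := by
    conv_lhs => rw [← ht]
    rw [hm, List.replicate_succ, List.flatten_cons]
  have hdrop : s.drop i = (List.replicate m (s.take i)).flatten := by
    conv_lhs => rw [hs']
    generalize s.take i = c at hctake ⊢
    rw [← hctake]
    exact List.drop_left
  rw [List.rotate_eq_drop_append_take hile, hdrop]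
  conv_rhs => rw [← ht, hm, List.replicate_succ', List.flatten_append]
  simp

-- occurrence inside (s+s)[1:-1]  ↔  a nontrivial rotation fixes s
theorem pvMid_iff_rotate (s : List Char) (hs : s ≠ []) :
    PySem.Chars.isIn s (((s ++ s).drop 1).dropLast) = true ↔
      ∃ j, 1 ≤ j ∧ j ≤ s.length - 1 ∧ s.rotate j = s := by
  have hn : 1 ≤ s.length := List.length_pos_iff.mpr hs
  rw [← PySem.Chars.exists_prefix_drop_iff_isIn]
  have hmid : ∀ j : Nat, (((s ++ s).drop 1).dropLast).drop j
      = ((s ++ s).drop (j + 1)).take (2 * s.length - 2 - j) := by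
    intro j
    rw [List.dropLast_eq_take, List.drop_take, List.drop_drop]
    congr 1
    · simp; omega
    · congr 1; omega
  have hdropT : ∀ t : Nat, t ≤ s.length → (s ++ s).drop t = s.drop t ++ s := by
    intro t ht
    rw [List.drop_append]
    congr 1
    rw [Nat.sub_eq_zero_of_le ht, List.drop_zero]
  have helper2 : ∀ t : Nat, t ≤ s.length → ((s <+: (s ++ s).drop t) ↔ s.rotate t = s) := by
    intro t ht
    rw [hdropT t ht, List.prefix_iff_eq_take, List.take_append,
        List.take_of_length_le (by simp), List.length_drop]
    rw [show s.length - (s.length - t) = t by omega]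
    rw [← List.rotate_eq_drop_append_take ht]
    exact eq_comm
  constructor
  · rintro ⟨j, hp⟩
    rw [hmid, List.prefix_take_iff] at hp
    obtain ⟨hp1, hlen⟩ := hp
    refine ⟨j + 1, by omega, by omega, ?_⟩
    exact (helper2 (j + 1) (by omega)).mp hp1
  · rintro ⟨t, ht1, ht2, hrot⟩
    refine ⟨t - 1, ?_⟩
    rw [hmid, List.prefix_take_iff]
    rw [show t - 1 + 1 = t by omega]
    exact ⟨(helper2 t (by omega)).mpr hrot, by omega⟩

-- the doubling trick: s occurs in (s+s)[1:-1] iff s is a tiling by a block of length ≤ |s|/2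
theorem pvMain (s : List Char) (hs : s ≠ []) :
    PySem.Chars.isIn s (((s ++ s).drop 1).dropLast) = true ↔
      ∃ i, 1 ≤ i ∧ i ≤ s.length / 2 ∧ (List.replicate (s.length / i) (s.take i)).flatten = s := by
  have hn : 1 ≤ s.length := List.length_pos_iff.mpr hs
  rw [pvMid_iff_rotate s hs]
  constructor
  · rintro ⟨j, hj1, hj2, hrot⟩
    have hjn : j < s.length := by omega
    have hg1 : 1 ≤ Nat.gcd j s.length := Nat.gcd_pos_of_pos_left _ (by omega)
    have hgle : Nat.gcd j s.length ≤ j := Nat.gcd_le_left s.length (by omega)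
    have hrotg := pvRotate_gcd s j hj1 hjn hrot
    obtain ⟨k, hk⟩ := Nat.gcd_dvd_right j s.length
    have hk2 : 2 ≤ k := by
      rcases Nat.lt_or_ge k 2 with h2 | h2
      · interval_cases k <;> omega
      · exact h2
    have hin : Nat.gcd j s.length ≤ s.length / 2 := by
      rw [Nat.le_div_iff_mul_le (by omega)]
      calc Nat.gcd j s.length * 2 ≤ Nat.gcd j s.length * k := Nat.mul_le_mul_left _ hk2
      _ = s.length := hk.symm
    exact ⟨Nat.gcd j s.length, hg1, hin,
      (pvTile_of_rotate s _ hg1 ⟨k, hk⟩ hrotg).symm⟩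
  · rintro ⟨i, hi1, hi2, ht⟩
    exact ⟨i, hi1, by omega, pvRotate_of_tile s i hi1 hi2 ht⟩

-- A's tile test at a Nat-cast candidate length
theorem pvTileA_natCast (cs : List Char) (i : Nat) :
    pvTileA cs (i : ℤ) = true ↔ (List.replicate (cs.length / i) (cs.take i)).flatten = cs := by
  unfold pvTileA
  rw [PySem.List.slice_to _ (by positivity), Int.toNat_natCast]
  have hf : PySem.Int.floordiv (cs.length:ℤ) (i:ℤ) = ((cs.length / i : ℕ) : ℤ) := by
    exact_mod_cast PySem.Int.floordiv_natCast cs.length i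
  rw [hf]
  simp [PySem.List.pyRepeat]
  norm_cast

-- A's existential over the int range pyRange 1 (n//2+1) is the Nat existential
theorem pvAnyTile_iff (cs : List Char) :
    (PySem.List.pyRange 1 (PySem.Int.floordiv (cs.length : Int) 2 + 1)).any (pvTileA cs) = true ↔
      ∃ i, 1 ≤ i ∧ i ≤ cs.length / 2 ∧ (List.replicate (cs.length / i) (cs.take i)).flatten = cs := by
  have h2 : PySem.Int.floordiv (cs.length:ℤ) 2 = ((cs.length / 2 : ℕ) : ℤ) := by
    exact_mod_cast PySem.Int.floordiv_natCast cs.length 2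
  rw [List.any_eq_true]
  constructor
  · rintro ⟨x, hx, htile⟩
    rw [PySem.List.mem_pyRange_one, h2] at hx
    have hxi : x = (x.toNat : ℤ) := (Int.toNat_of_nonneg (by omega)).symm
    rw [hxi] at htile
    rw [pvTileA_natCast] at htile
    exact ⟨x.toNat, by omega, by omega, htile⟩
  · rintro ⟨i, hi1, hi2, ht⟩
    refine ⟨(i : ℤ), ?_, (pvTileA_natCast cs i).mpr ht⟩
    rw [PySem.List.mem_pyRange_one, h2]
    constructor <;> [exact_mod_cast hi1; exact_mod_cast (by omega : (i:ℤ) < (cs.length / 2 : ℕ) + 1)]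

-- range(q, q+1) is the singleton [q]
theorem pvRange_single (q : Int) : PySem.List.pyRange q (q + 1) = [q] := by
  rw [PySem.List.pyRange_one_cons (by omega), PySem.List.pyRange]
  simp

-- the half-tiling of an even-length list says exactly that the two halves agree
theorem pvHalf_iff (cs : List Char) (hne : cs ≠ []) (he : cs.length % 2 = 0) :
    ((List.replicate (cs.length / (cs.length / 2)) (cs.take (cs.length / 2))).flatten = cs) ↔
      cs.take (cs.length / 2) = cs.drop (cs.length / 2) := by
  have hn : 1 ≤ cs.length := List.length_pos_iff.mpr hne
  have hq1 : 1 ≤ cs.length / 2 := by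
    rw [Nat.one_le_div_iff (by omega)]; omega
  have hdiv : cs.length / (cs.length / 2) = 2 :=
    Nat.div_div_self (Nat.dvd_of_mod_eq_zero he) (by omega)
  rw [hdiv]
  have hflat : (List.replicate 2 (cs.take (cs.length / 2))).flatten
      = cs.take (cs.length / 2) ++ cs.take (cs.length / 2) := by simp [List.replicate_succ]
  rw [hflat]
  constructor
  · intro h
    have h2 : cs.take (cs.length / 2) ++ cs.take (cs.length / 2)
        = cs.take (cs.length / 2) ++ cs.drop (cs.length / 2) :=
      h.trans (List.take_append_drop _ cs).symm
    exact (List.append_inj h2 rfl).2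
  · intro h
    nth_rewrite 2 [h]
    exact List.take_append_drop _ cs

-- per-id agreement of the two loop bodies, part == 1 case
theorem pvStep_eq_part1 (cs : List Char) (v : Int) (acc : List Int) (hcs : cs ≠ []) :
    (if (PySem.Int.mod (cs.length : ℤ) 2 == 0) = true then
        pvInnerA cs v acc (PySem.List.pyRange (PySem.Int.floordiv (cs.length : ℤ) 2)
          (PySem.Int.floordiv (cs.length : ℤ) 2 + 1))
      else acc) =
      if pvRepB cs 1 = true then acc ++ [v] else acc := by
  have hn : 1 ≤ cs.length := List.length_pos_iff.mpr hcs
  have hmod : PySem.Int.mod (cs.length : ℤ) 2 = ((cs.length % 2 : ℕ) : ℤ) := by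
    exact_mod_cast PySem.Int.mod_natCast cs.length 2
  have hfd : PySem.Int.floordiv (cs.length : ℤ) 2 = ((cs.length / 2 : ℕ) : ℤ) := by
    exact_mod_cast PySem.Int.floordiv_natCast cs.length 2
  by_cases he : cs.length % 2 = 0
  · have hbeq : (PySem.Int.mod (cs.length : ℤ) 2 == 0) = true := by
      rw [hmod, he]; decide
    have hA : pvTileA cs (PySem.Int.floordiv (cs.length : ℤ) 2) = true ↔
        cs.take (cs.length / 2) = cs.drop (cs.length / 2) := by
      rw [hfd, pvTileA_natCast]
      exact pvHalf_iff cs hcs he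
    have hRep : pvRepB cs 1 = (cs.take (cs.length / 2) == cs.drop (cs.length / 2)) := by
      simp only [pvRepB]
      rw [if_pos (by decide), hfd, PySem.List.slice_to _ (Int.natCast_nonneg _),
        PySem.List.slice_from _ (Int.natCast_nonneg _), Int.toNat_natCast, hbeq,
        decide_eq_true (show (0:ℤ) < (cs.length : ℤ) by exact_mod_cast hn),
        Bool.true_and, Bool.true_and]
    rw [if_pos hbeq, pvRange_single, hRep]
    have hinner : pvInnerA cs v acc [PySem.Int.floordiv (cs.length : ℤ) 2] =
        if pvTileA cs (PySem.Int.floordiv (cs.length : ℤ) 2) = true then acc ++ [v] else acc := by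
      simp [pvInnerA]
    rw [hinner]
    by_cases hq : cs.take (cs.length / 2) = cs.drop (cs.length / 2)
    · rw [if_pos (hA.mpr hq), if_pos (by rw [beq_iff_eq]; exact hq)]
    · rw [if_neg (fun h => hq (hA.mp h)), if_neg (by rw [beq_iff_eq]; exact hq)]
  · have hbeq : (PySem.Int.mod (cs.length : ℤ) 2 == 0) = false := by
      rw [hmod]
      exact beq_eq_false_iff_ne.mpr (by exact_mod_cast he)
    rw [if_neg (by rw [hbeq]; exact Bool.false_ne_true)]
    have hRep : pvRepB cs 1 = false := by
      simp only [pvRepB]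
      rw [if_pos (by decide), hbeq]
      simp
    rw [hRep]
    simp

-- per-id agreement of the two loop bodies, part != 1 case
theorem pvStep_eq_part2 (cs : List Char) (v : Int) (acc : List Int) (p : Int) (hp : p ≠ 1) :
    pvInnerA cs v acc (PySem.List.pyRange 1 (PySem.Int.floordiv (cs.length : ℤ) 2 + 1)) =
      if pvRepB cs p = true then acc ++ [v] else acc := by
  rw [pvInnerA_eq]
  by_cases hcs : cs = []
  · subst hcs
    have hany : ((PySem.List.pyRange 1 (PySem.Int.floordiv ((([] : List Char).length : ℕ) : ℤ) 2 + 1)).any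
        (pvTileA [])) = false := by decide
    have hRep : pvRepB [] p = false := by
      simp only [pvRepB]
      rw [if_neg (by simpa using hp)]
      simp
    rw [hany, hRep]
  · have hn : 1 ≤ cs.length := List.length_pos_iff.mpr hcs
    have hRep : pvRepB cs p = PySem.Chars.isIn cs (((cs ++ cs).drop 1).dropLast) := by
      simp only [pvRepB]
      rw [if_neg (by simpa using hp), pvSlice_mid,
        decide_eq_true (show (0:ℤ) < (cs.length : ℤ) by exact_mod_cast hn), Bool.true_and]
    have hcond : ((PySem.List.pyRange 1 (PySem.Int.floordiv (cs.length : ℤ) 2 + 1)).any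
        (pvTileA cs)) = PySem.Chars.isIn cs (((cs ++ cs).drop 1).dropLast) := by
      rcases Bool.eq_false_or_eq_true (PySem.Chars.isIn cs (((cs ++ cs).drop 1).dropLast))
        with hbv | hbv <;> rw [hbv]
      · rw [pvAnyTile_iff, ← pvMain cs hcs, hbv]
      · rw [← Bool.not_eq_true, pvAnyTile_iff, ← pvMain cs hcs, hbv]
        simp
    rw [hcond, hRep]

-- per-id agreement of the two loop bodies
theorem pvStep_eq (puzzle_part : Int) (id : String) (hne : puzzle_part = 1 → id ≠ "")
    (acc : List Int) :
    pvStepA puzzle_part acc id =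
      if pvRepB id.toList puzzle_part then acc ++ [(PySem.Int.ofStr? id).getD 0] else acc := by
  by_cases hp : puzzle_part = 1
  · subst hp
    have hcs : id.toList ≠ [] := by simpa using hne rfl
    simp only [pvStepA]
    rw [if_pos (by decide)]
    exact pvStep_eq_part1 id.toList ((PySem.Int.ofStr? id).getD 0) acc hcs
  · simp only [pvStepA]
    rw [if_neg (by simpa using hp)]
    exact pvStep_eq_part2 id.toList ((PySem.Int.ofStr? id).getD 0) acc puzzle_part hp

-- ===== VERDICT (by name: the statement is the Claim_ definition above) =====
theorem get_invalid_ids_spec : Claim_equal_get_invalid_ids := by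
  intro ids puzzle_part _ hpre
  unfold Spec_get_invalid_ids get_invalid_ids get_invalid_ids_alt
  exact PySem.List.foldl_congr_mem' ids _ _ []
    (fun id hid acc => pvStep_eq puzzle_part id (fun h1 => by
      intro he; exact hpre.1 h1 (he ▸ hid)) acc)
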